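-- pv_equiv track=rewrite | github.com/Ariello05/coding-data-compression-cs | Lista7/dekoder.py | get_encoded
-- ===== SOURCE A (Python) =====
-- available_codes = [
--     '00000000',
--     '11010010',
--     '01010101',
--     '10000111',
--     '10011001',
--     '01001011',
--     '11001100',
--     '00011110',
--     '11100001',
--     '00110011',
--     '10110100',
--     '01100110',
--     '01111000',
--     '10101010',
--     '00101101',
--     '11111111',
-- ]
--
-- def get_encoded(bits):
--     result = "0000"
--
--     for code in available_codes:
--         diffs = 0
--         for index, value in enumerate(code):
--             if value != bits[index]:
--                 diffs += 1
--
--         if diffs == 0: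
--             return (bits[2] + bits[4:7], False)
--         elif diffs == 1:  # correctable
--             return (code[2] + code[4:7], False)
--
--     return (result, True)
-- ===== SOURCE B (Python) =====
-- available_codes = [
--     '00000000',
--     '11010010',
--     '01010101',
--     '10000111',
--     '10011001',
--     '01001011',
--     '11001100',
--     '00011110',
--     '11100001',
--     '00110011',
--     '10110100',
--     '01100110',
--     '01111000',
--     '10101010',
--     '00101101',
--     '11111111',
-- ]
--
-- def get_encoded(bits):
--     def dist(code):
--         d = 0
--         for i in range(8):
--             if code[i] != bits[i]:
--                 d += 1
--         return d
--
--     best = min(available_codes, key=dist)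
--     if dist(best) <= 1:
--         return (best[2] + best[4:7], False)
--     return ("0000", True)
-- ===== Notes on version B (the rewrite author's own statement) =====
-- stated objective: alternative
-- what changed: A's threshold early-return scan (return as soon as a codeword with <=1 mismatches is seen) is replaced by a full argmin over the codebook with min(key=dist) followed by a single threshold decision on the nearest codeword.
import Mathlib
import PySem

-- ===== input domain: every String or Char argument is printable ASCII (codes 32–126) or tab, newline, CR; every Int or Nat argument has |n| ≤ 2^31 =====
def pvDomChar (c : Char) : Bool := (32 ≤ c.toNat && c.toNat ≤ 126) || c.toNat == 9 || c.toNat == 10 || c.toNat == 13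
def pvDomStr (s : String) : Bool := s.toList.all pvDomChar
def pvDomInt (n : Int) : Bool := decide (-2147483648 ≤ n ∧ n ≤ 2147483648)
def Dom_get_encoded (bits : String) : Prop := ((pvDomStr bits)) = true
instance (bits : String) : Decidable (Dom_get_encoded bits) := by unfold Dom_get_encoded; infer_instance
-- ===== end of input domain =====

-- B replaces A's threshold early-return scan over the codebook by a full argmin
-- (min with a mismatch-count key) followed by one threshold decision on the nearest codeword.

-- module constant shared by both Pythons
def available_codes : List (List Char) :=
  ["00000000".toList, "11010010".toList, "01010101".toList, "10000111".toList,
   "10011001".toList, "01001011".toList, "11001100".toList, "00011110".toList,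
   "11100001".toList, "00110011".toList, "10110100".toList, "01100110".toList,
   "01111000".toList, "10101010".toList, "00101101".toList, "11111111".toList]

-- w[2] + w[4:7] — the expression both Pythons share
def pvCodeWord (w : List Char) : List Char :=
  (PySem.List.pyGet? w 2).elim [] (fun ch => [ch]) ++ PySem.List.slice w (some 4) (some 7)

-- ===== PORT A =====
-- inner loop: for index, value in enumerate(code): if value != bits[index]: diffs += 1
def pvDiffsA (bl : List Char) (code : List Char) : Nat :=
  (PySem.List.enumerate code 0).foldl
    (fun diffs iv => if some iv.2 ≠ PySem.List.pyGet? bl iv.1 then diffs + 1 else diffs) 0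

-- outer loop with its two early returns
def pvScanA (bl : List Char) : List (List Char) → String × Bool
  | [] => ("0000", true)
  | code :: rest =>
    let diffs := pvDiffsA bl code
    if diffs = 0 then (String.ofList (pvCodeWord bl), false)
    else if diffs = 1 then (String.ofList (pvCodeWord code), false)
    else pvScanA bl rest

def get_encoded (bits : String) : String × Bool := pvScanA bits.toList available_codes

-- ===== PORT B =====
-- dist(code): d = 0; for i in range(8): if code[i] != bits[i]: d += 1
def pvDistB (bl : List Char) (code : List Char) : Nat :=
  (PySem.List.pyRange 0 8 1).foldl
    (fun d i => if PySem.List.pyGet? code i ≠ PySem.List.pyGet? bl i then d + 1 else d) 0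

def get_encoded_alt (bits : String) : String × Bool :=
  match PySem.List.min? available_codes (pvDistB bits.toList) with
  | none => ("0000", true)          -- unreachable: available_codes is a nonempty literal
  | some best =>
    if pvDistB bits.toList best ≤ 1 then (String.ofList (pvCodeWord best), false)
    else ("0000", true)

-- ===== PRECONDITION & SPEC =====
-- Python A raises IndexError (bits[index] inside the first inner loop) exactly when len(bits) < 8.
def Pre_get_encoded (bits : String) : Prop := 8 ≤ bits.toList.length
instance (bits : String) : Decidable (Pre_get_encoded bits) := by unfold Pre_get_encoded; infer_instance
def pvWitness_get_encoded : String := "01010100"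
def Spec_get_encoded (bits : String) (out : String × Bool) : Prop := out = get_encoded_alt bits
instance (bits : String) (out : String × Bool) : Decidable (Spec_get_encoded bits out) := by unfold Spec_get_encoded; infer_instance

-- ===== CLAIM (what is proved, stated in full; the proofs are below) =====
def Claim_equal_get_encoded : Prop := ∀ (bits : String), Dom_get_encoded bits → Pre_get_encoded bits → Spec_get_encoded bits (get_encoded bits)

-- ===== LEMMAS AND PROOFS =====

-- number of mismatches between c and b on positions 0..7 — the common value of both ports' counters
def nd (c b : List Char) : Nat :=
  (List.range 8).countP
    (fun (n : Nat) => decide (PySem.List.pyGet? c (n:Int) ≠ PySem.List.pyGet? b (n:Int)))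

theorem foldl_count {α : Type} (l : List α) (p : α → Prop) [DecidablePred p] (n : Nat) :
    l.foldl (fun d x => if p x then d + 1 else d) n = n + l.countP (fun x => decide (p x)) := by
  induction l generalizing n with
  | nil => simp
  | cons x t ih =>
    simp only [List.foldl_cons, List.countP_cons, ih]
    by_cases hp : p x
    · simp [hp]; omega
    · simp [hp]

theorem countP_tri {α : Type} (l : List α) (p q r : α → Bool)
    (h : ∀ x, p x → q x ∨ r x) : l.countP p ≤ l.countP q + l.countP r := by
  induction l with
  | nil => simp
  | cons x t ih =>
    simp only [List.countP_cons]
    have := h x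
    cases hp : p x <;> cases hq : q x <;> cases hr : r x <;> simp_all <;> omega

theorem nd_tri (a b c : List Char) : nd a c ≤ nd a b + nd b c := by
  apply countP_tri
  intro i
  simp only [decide_eq_true_eq]
  intro h
  by_cases hab : PySem.List.pyGet? a (i:Int) = PySem.List.pyGet? b (i:Int)
  · right; rw [← hab]; exact h
  · left; exact hab

theorem nd_symm (a b : List Char) : nd a b = nd b a := by
  unfold nd
  apply List.countP_congr
  intro i _
  simp [ne_comm]

theorem pair3 : ∀ c ∈ available_codes, ∀ c' ∈ available_codes, c ≠ c' → 3 ≤ nd c c' := by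
  decide

theorem bridgeB (bl c : List Char) : pvDistB bl c = nd c bl := by
  unfold pvDistB nd
  rw [show (8:Int) = ((8:Nat):Int) by norm_num, PySem.List.pyRange_zero_natCast, List.foldl_map]
  rw [foldl_count _ (fun n : Nat => PySem.List.pyGet? c (n:Int) ≠ PySem.List.pyGet? bl (n:Int))]
  simp

theorem enum_count (bl : List Char) : ∀ (c : List Char) (s : Nat),
    (PySem.List.enumerate c (s:Int)).countP
        (fun iv => decide (some iv.2 ≠ PySem.List.pyGet? bl iv.1))
      = (List.range c.length).countP
        (fun (n : Nat) => decide (PySem.List.pyGet? c (n:Int) ≠ PySem.List.pyGet? bl (↑(s + n) : Int))) := by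
  intro c
  induction c with
  | nil => intro s; simp [PySem.List.enumerate_nil]
  | cons ch c' ih =>
    intro s
    rw [PySem.List.enumerate_cons, List.length_cons, List.range_succ_eq_map]
    rw [List.countP_cons, List.countP_cons, List.countP_map]
    have h1 : ((s:Int) + 1) = (((s+1:Nat)):Int) := by push_cast; ring
    rw [h1, ih (s+1)]
    congr 1
    · apply List.countP_congr
      intro m _
      simp only [Function.comp_apply, decide_eq_true_eq, Nat.succ_eq_add_one]
      have e1 : PySem.List.pyGet? (ch :: c') ((m+1 : Nat):Int) = PySem.List.pyGet? c' (m:Int) := by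
        push_cast
        exact PySem.List.pyGet?_cons_succ ch c' m
      rw [e1, show s + 1 + m = s + (m+1) from by omega]
    · simp

theorem bridgeA (bl : List Char) : ∀ c ∈ available_codes, pvDiffsA bl c = nd c bl := by
  intro c hc
  have hlen : c.length = 8 := by fin_cases hc <;> rfl
  unfold pvDiffsA
  rw [show (0:Int) = ((0:Nat):Int) by norm_num]
  rw [foldl_count _ (fun iv : Int × Char => some iv.2 ≠ PySem.List.pyGet? bl iv.1)]
  rw [enum_count bl c 0]
  unfold nd
  rw [hlen]
  simp

theorem word_eq_of_nd_zero (bl : List Char) :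
    ∀ c ∈ available_codes, nd c bl = 0 → pvCodeWord bl = pvCodeWord c := by
  intro c hc h0
  have hfacts := List.countP_eq_zero.mp h0
  have hg : ∀ (n : Nat), n < 8 → getElem? bl n = getElem? c n := by
    intro n hn
    have := hfacts n (List.mem_range.mpr hn)
    simp only [decide_eq_true_eq, not_not, PySem.List.pyGet?_natCast] at this
    exact this.symm
  unfold pvCodeWord
  have h2 : PySem.List.pyGet? bl 2 = PySem.List.pyGet? c 2 := by
    rw [show (2:Int) = ((2:Nat):Int) by norm_num, PySem.List.pyGet?_natCast,
        PySem.List.pyGet?_natCast]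
    exact hg 2 (by norm_num)
  have hs : PySem.List.slice bl (some 4) (some 7) = PySem.List.slice c (some 4) (some 7) := by
    rw [PySem.List.slice_toNat bl (by norm_num) (by norm_num),
        PySem.List.slice_toNat c (by norm_num) (by norm_num)]
    apply List.ext_getElem?
    intro i
    by_cases hi : i < 3
    · simp only [List.getElem?_take, List.getElem?_drop,
        show Int.toNat 7 = 7 from rfl, show Int.toNat 4 = 4 from rfl]
      rw [if_pos (show i < 7 - 4 by omega), if_pos (show i < 7 - 4 by omega)]
      exact hg (4 + i) (by omega)
    · simp [show Int.toNat 7 = 7 from rfl, show Int.toNat 4 = 4 from rfl, hi]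
  rw [h2, hs]

theorem scan_all_big (bl : List Char) (l : List (List Char))
    (h : ∀ c ∈ l, 2 ≤ pvDiffsA bl c) : pvScanA bl l = ("0000", true) := by
  induction l with
  | nil => rfl
  | cons c r ih =>
    have hc := h c (by simp)
    simp only [pvScanA]
    rw [if_neg (by omega), if_neg (by omega)]
    exact ih (fun x hx => h x (by simp [hx]))

theorem scan_hit (bl : List Char) (l : List (List Char)) (m : List Char)
    (hm : m ∈ l) (h1 : pvDiffsA bl m ≤ 1)
    (hother : ∀ c ∈ l, c ≠ m → 2 ≤ pvDiffsA bl c)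
    (hword : pvDiffsA bl m = 0 → pvCodeWord bl = pvCodeWord m) :
    pvScanA bl l = (String.ofList (pvCodeWord m), false) := by
  induction l with
  | nil => simp at hm
  | cons c r ih =>
    by_cases hcm : c = m
    · subst hcm
      simp only [pvScanA]
      by_cases h0 : pvDiffsA bl c = 0
      · rw [if_pos h0, hword h0]
      · rw [if_neg h0, if_pos (by omega)]
    · have hc2 := hother c (by simp) hcm
      simp only [pvScanA]
      rw [if_neg (by omega), if_neg (by omega)]
      have hm' : m ∈ r := by
        rcases List.mem_cons.mp hm with h | h
        · exact absurd h.symm hcm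
        · exact h
      exact ih hm' (fun x hx hxm => hother x (by simp [hx]) hxm)

-- ===== VERDICT (by name: the statement is the Claim_ definition above) =====
theorem get_encoded_spec : Claim_equal_get_encoded := by
  intro bits _ hpre
  unfold Spec_get_encoded get_encoded get_encoded_alt
  obtain ⟨m, hm⟩ : ∃ m, PySem.List.min? available_codes (pvDistB bits.toList) = some m := by
    cases h : PySem.List.min? available_codes (pvDistB bits.toList) with
    | none => exact absurd ((PySem.List.min?_eq_none_iff _ _).mp h) (by decide)
    | some m => exact ⟨m, rfl⟩
  have hmem : m ∈ available_codes := PySem.List.min?_mem hm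
  have hmin : ∀ y ∈ available_codes, pvDistB bits.toList m ≤ pvDistB bits.toList y :=
    PySem.List.min?_isMin hm
  set bl := bits.toList with hbl
  rw [hm]
  show pvScanA bl available_codes =
    if pvDistB bl m ≤ 1 then (String.ofList (pvCodeWord m), false) else ("0000", true)
  by_cases hle : pvDistB bl m ≤ 1
  · rw [if_pos hle]
    apply scan_hit bl available_codes m hmem
    · rw [bridgeA bl m hmem, ← bridgeB]; exact hle
    · intro c hc hcm
      rw [bridgeA bl c hc]
      have h3 := pair3 c hc m hmem hcm
      have ht := nd_tri c bl m
      have hs : nd bl m ≤ 1 := by rw [← nd_symm, ← bridgeB]; exact hle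
      omega
    · intro h0
      rw [bridgeA bl m hmem] at h0
      exact word_eq_of_nd_zero bl m hmem h0
  · rw [if_neg hle]
    apply scan_all_big
    intro c hc
    rw [bridgeA bl c hc, ← bridgeB]
    have := hmin c hc
    omega
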